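-- pv_equiv track=rewrite | github.com/Frode-Henrol/AdventOfCode | AD4/ad4_2.py | check_for_mas
-- ===== SOURCE A (Python) =====
-- def check_for_mas(inputlist):
--     # Find the 2 longest sub_list i diagonal list:
--     sorted_length = sorted(inputlist, key=len, reverse=True)[:2]
--
--     mas_count_sub = 0
--
--     # Check each diagonal for "MAS" and "SAM" and count +1 if both diagonal inlucde it
--     for diagonal in sorted_length:
--         row_string = "".join(diagonal)
--         mas_count_sub += row_string.count("MAS") + row_string.count("SAM")
--     if mas_count_sub == 2:
--         return 1
--     return 0
-- ===== SOURCE B (Python) =====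
-- def check_for_mas(inputlist):
--     # One linear pass keeping the two longest diagonals (earlier wins ties),
--     # instead of sorting the whole list.
--     best = []  # at most two diagonals, longest first
--     for d in inputlist:
--         if not best:
--             best = [d]
--         elif len(d) > len(best[0]):
--             best = [d, best[0]]
--         elif len(best) == 1:
--             best = [best[0], d]
--         elif len(d) > len(best[1]):
--             best = [best[0], d]
--     total = 0
--     for d in best:
--         s = "".join(d)
--         total += s.count("MAS") + s.count("SAM")
--     return 1 if total == 2 else 0
-- ===== Notes on version B (the rewrite author's own statement) =====
-- stated objective: alternative
-- what changed: Replaces the full stable descending sort (take two) with a single linear selection pass that keeps the two longest diagonals using strict > comparisons, so earlier diagonals win ties exactly as the stable reverse sort does.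
import Mathlib
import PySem

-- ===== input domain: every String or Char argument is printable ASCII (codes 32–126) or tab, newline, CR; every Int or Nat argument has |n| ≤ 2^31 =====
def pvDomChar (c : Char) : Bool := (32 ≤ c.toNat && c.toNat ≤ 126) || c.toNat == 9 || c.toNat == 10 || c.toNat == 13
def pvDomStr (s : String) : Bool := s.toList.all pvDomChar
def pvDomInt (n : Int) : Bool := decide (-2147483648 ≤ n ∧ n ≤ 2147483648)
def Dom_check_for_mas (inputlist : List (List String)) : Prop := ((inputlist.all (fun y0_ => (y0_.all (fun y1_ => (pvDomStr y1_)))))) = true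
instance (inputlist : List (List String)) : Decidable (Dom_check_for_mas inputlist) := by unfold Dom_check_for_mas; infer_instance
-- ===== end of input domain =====

-- B replaces the full stable descending sort with one linear pass keeping the two
-- longest diagonals (strict > so earlier diagonals win ties); objective: alternative.

-- ===== PORT A =====
def check_for_mas (inputlist : List (List String)) : Int :=
  -- sorted(inputlist, key=len, reverse=True)[:2]
  let sorted_length := (PySem.List.sorted inputlist (fun d => d.length) true).take 2
  -- for diagonal in sorted_length: mas_count_sub += count("MAS") + count("SAM")
  let mas_count_sub : Int := sorted_length.foldl (fun acc diagonal =>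
    let row_string := PySem.Str.join "" diagonal
    acc + ((PySem.Str.count row_string "MAS" : Int) + (PySem.Str.count row_string "SAM" : Int))) 0
  if mas_count_sub == 2 then 1 else 0

-- ===== PORT B =====
-- one step of B's selection loop: keep the two longest so far (longest first)
def pvBestStep (best : List (List String)) (d : List String) : List (List String) :=
  match best with
  | [] => [d]
  | b0 :: rest =>
    if b0.length < d.length then [d, b0]
    else match rest with
      | [] => [b0, d]
      | b1 :: _ => if b1.length < d.length then [b0, d] else best

def check_for_mas_alt (inputlist : List (List String)) : Int :=
  let best := inputlist.foldl pvBestStep []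
  let total : Int := best.foldl (fun acc d =>
    let s := PySem.Str.join "" d
    acc + ((PySem.Str.count s "MAS" : Int) + (PySem.Str.count s "SAM" : Int))) 0
  if total == 2 then 1 else 0

-- ===== PRECONDITION & SPEC =====
def Spec_check_for_mas (inputlist : List (List String)) (out : Int) : Prop := out = check_for_mas_alt inputlist
instance (inputlist : List (List String)) (out : Int) : Decidable (Spec_check_for_mas inputlist out) := by unfold Spec_check_for_mas; infer_instance

-- ===== CLAIM (what is proved, stated in full; the proofs are below) =====
def Claim_equal_check_for_mas : Prop := ∀ (inputlist : List (List String)), Dom_check_for_mas inputlist → Spec_check_for_mas inputlist (check_for_mas inputlist)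

-- ===== LEMMAS AND PROOFS =====

-- the insertion predicate of A's reverse sort by length
def pvIns (x : List String) (acc : List (List String)) : List (List String) :=
  PySem.List.insertBy (fun a b => decide (b.length < a.length)) x acc

lemma take_two_insertBy (x : List String) (acc : List (List String)) :
    (pvIns x acc).take 2 = pvBestStep (acc.take 2) x := by
  match acc with
  | [] => rfl
  | [a] =>
      simp only [pvIns, PySem.List.insertBy, pvBestStep]
      by_cases h : a.length < x.length <;> simp [h]
  | a :: b :: rest =>
      simp only [pvIns, PySem.List.insertBy, pvBestStep]
      by_cases h1 : a.length < x.length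
      · simp [h1]
      · by_cases h2 : b.length < x.length <;>
          simp [h1, h2, List.take]

lemma foldl_take_two (xs : List (List String)) (acc : List (List String)) :
    (xs.foldl (fun acc x => pvIns x acc) acc).take 2 = xs.foldl pvBestStep (acc.take 2) := by
  induction xs generalizing acc with
  | nil => rfl
  | cons x xs ih =>
      simp only [List.foldl_cons, ih, take_two_insertBy]

lemma sorted_take_two (xs : List (List String)) :
    (PySem.List.sorted xs (fun d => d.length) true).take 2 = xs.foldl pvBestStep [] := by
  rw [PySem.List.sorted_rev_eq_foldl_insertBy]
  exact foldl_take_two xs []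

-- ===== VERDICT (by name: the statement is the Claim_ definition above) =====
theorem check_for_mas_spec : Claim_equal_check_for_mas := by
  intro inputlist _
  unfold Spec_check_for_mas check_for_mas check_for_mas_alt
  rw [sorted_take_two]
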